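-- pv_equiv track=rewrite | github.com/jakeeqsb/tracelog | tracelog/ingestion/aggregator.py | _find_insertion_index
-- ===== SOURCE A (Python) =====
-- def _find_insertion_index(lines: list[str]) -> int:
--     """Finds where child spans should be inserted in a parent span body.
--
--     Child spans are inserted before trailing top-level terminators such as
--     ``<<`` or ``!!`` so that nested work appears before the parent closes.
--
--     Args:
--         lines: Trace-DSL lines that belong to one span.
--
--     Returns:
--         The insertion index for rendered child spans.
--     """
--     if not lines:
--         return 0
--
--     first_line = lines[0]
--     base_indent = len(first_line) - len(first_line.lstrip(" "))
--     index = len(lines)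
--
--     while index > 0:
--         current = lines[index - 1]
--         stripped = current.lstrip(" ")
--         indent = len(current) - len(stripped)
--         if indent == base_indent and (
--             stripped.startswith("<< ") or stripped.startswith("!! ")
--         ):
--             index -= 1
--             continue
--         break
--
--     return index
-- ===== SOURCE B (Python) =====
-- def _find_insertion_index(lines: list[str]) -> int:
--     """Single forward pass: track the index of the last line that is not a
--     top-level terminator; the insertion point is right after it."""
--     if not lines:
--         return 0
--
--     first_line = lines[0]
--     base_indent = len(first_line) - len(first_line.lstrip(" "))
--
--     last_non_terminator = -1
--     for i, line in enumerate(lines):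
--         stripped = line.lstrip(" ")
--         if len(line) - len(stripped) == base_indent and (
--             stripped.startswith("<< ") or stripped.startswith("!! ")
--         ):
--             continue
--         last_non_terminator = i
--
--     return last_non_terminator + 1
-- ===== Notes on version B (the rewrite author's own statement) =====
-- stated objective: alternative
-- what changed: Replaces A's backward while-loop that decrements an index past trailing terminators with a single forward pass that records the index of the last non-terminator line and returns it plus one.
import Mathlib
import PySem

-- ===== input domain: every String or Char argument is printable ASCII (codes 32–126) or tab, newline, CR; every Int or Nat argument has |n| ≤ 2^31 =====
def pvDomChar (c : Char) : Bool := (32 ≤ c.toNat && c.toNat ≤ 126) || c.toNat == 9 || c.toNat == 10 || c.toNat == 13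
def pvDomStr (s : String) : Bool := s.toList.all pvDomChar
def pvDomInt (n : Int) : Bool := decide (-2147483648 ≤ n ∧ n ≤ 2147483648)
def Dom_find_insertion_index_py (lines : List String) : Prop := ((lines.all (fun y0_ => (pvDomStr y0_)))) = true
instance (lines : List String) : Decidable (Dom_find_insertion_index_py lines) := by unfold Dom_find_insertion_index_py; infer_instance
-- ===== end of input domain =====

-- B replaces A's backward while-loop with one forward pass tracking the last
-- non-terminator index (same result; different decomposition, not faster).

-- s.lstrip(" ") — hand port, exact: drops leading ' ' characters only
def pvLstripSp (s : String) : String := String.ofList (s.toList.dropWhile (fun c => c == ' '))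

-- ===== PORT A =====
-- A's while-loop, recursing on the decreasing index; lines[index-1] is always
-- in range in the call context (index starts at len(lines)), so getD is exact.
def pvLoopA (lines : List String) (base : Int) : Nat → Nat
  | 0 => 0
  | i + 1 =>
    let current := lines.getD i ""
    let stripped := pvLstripSp current
    let indent : Int := PySem.Str.len current - PySem.Str.len stripped
    if indent == base
        && (PySem.Str.startswith stripped "<< " || PySem.Str.startswith stripped "!! ") then
      pvLoopA lines base i
    else
      i + 1

def find_insertion_index_py (lines : List String) : Int :=
  match lines with
  | [] => 0
  | first_line :: _ =>
    let base_indent := PySem.Str.len first_line - PySem.Str.len (pvLstripSp first_line)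
    ((pvLoopA lines base_indent lines.length : Nat) : Int)

-- ===== PORT B =====
def pvStepB (base : Int) (acc : Int) (p : Int × String) : Int :=
  let stripped := pvLstripSp p.2
  if PySem.Str.len p.2 - PySem.Str.len stripped == base
      && (PySem.Str.startswith stripped "<< " || PySem.Str.startswith stripped "!! ") then
    acc
  else
    p.1

def find_insertion_index_py_alt (lines : List String) : Int :=
  match lines with
  | [] => 0
  | first_line :: _ =>
    let base_indent := PySem.Str.len first_line - PySem.Str.len (pvLstripSp first_line)
    (PySem.List.enumerate lines 0).foldl (pvStepB base_indent) (-1) + 1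

-- ===== PRECONDITION & SPEC =====
def Spec_find_insertion_index_py (lines : List String) (out : Int) : Prop := out = find_insertion_index_py_alt lines
instance (lines : List String) (out : Int) : Decidable (Spec_find_insertion_index_py lines out) := by unfold Spec_find_insertion_index_py; infer_instance

-- ===== CLAIM (what is proved, stated in full; the proofs are below) =====
def Claim_equal_find_insertion_index_py : Prop := ∀ (lines : List String), Dom_find_insertion_index_py lines → Spec_find_insertion_index_py lines (find_insertion_index_py lines)

-- ===== LEMMAS AND PROOFS =====

-- the shared terminator test, for the proofs
def pvIsTerm (base : Int) (s : String) : Bool :=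
  let stripped := pvLstripSp s
  PySem.Str.len s - PySem.Str.len stripped == base
    && (PySem.Str.startswith stripped "<< " || PySem.Str.startswith stripped "!! ")

lemma pvLoopA_succ (ls : List String) (base : Int) (i : Nat) :
    pvLoopA ls base (i + 1)
      = if pvIsTerm base (ls.getD i "") then pvLoopA ls base i else i + 1 := rfl

lemma pvStepB_eq (base : Int) (a j : Int) (y : String) :
    pvStepB base a (j, y) = if pvIsTerm base y then a else j := rfl

lemma pvTakeWhile_len_le {p : String → Bool} (l : List String) :
    (l.takeWhile p).length ≤ l.length := (l.takeWhile_sublist p).length_le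

lemma pvLoopA_char (ls : List String) (base : Int) :
    ∀ i, i ≤ ls.length →
      pvLoopA ls base i = i - (((ls.take i).reverse.takeWhile (pvIsTerm base)).length) := by
  intro i
  induction i with
  | zero => intro _; simp [pvLoopA]
  | succ i ih =>
    intro h
    have hi : i < ls.length := by omega
    have hget : ls.getD i "" = ls[i] := by simp [List.getD_eq_getElem?_getD, hi]
    have hrev : (ls.take (i + 1)).reverse = ls[i] :: (ls.take i).reverse := by
      rw [List.take_add_one]; simp [hi]
    have hlen : (((ls.take i).reverse.takeWhile (pvIsTerm base)).length) ≤ i := by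
      have h1 := pvTakeWhile_len_le (p := pvIsTerm base) ((ls.take i).reverse)
      simpa [Nat.min_eq_left (le_of_lt hi)] using h1
    rw [pvLoopA_succ, hget, hrev, List.takeWhile_cons]
    by_cases hp : pvIsTerm base ls[i] = true
    · rw [if_pos hp, if_pos hp, ih (by omega), List.length_cons]
      omega
    · rw [if_neg hp, if_neg hp, List.length_nil]
      omega

lemma pvFoldB_char (base : Int) (ls : List String) :
    (PySem.List.enumerate ls 0).foldl (pvStepB base) (-1) + 1
      = (ls.length : Int) - ((ls.reverse.takeWhile (pvIsTerm base)).length : Int) := by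
  induction ls using List.reverseRecOn with
  | nil => simp [PySem.List.enumerate]
  | append_singleton ys y ih =>
    have hrev : (ys ++ [y]).reverse = y :: ys.reverse := by simp
    rw [PySem.List.enumerate_append, hrev, List.takeWhile_cons]
    simp only [List.foldl_append, PySem.List.enumerate, List.foldl_cons, List.foldl_nil,
      pvStepB_eq, List.length_append, List.length_cons, List.length_nil]
    by_cases hp : pvIsTerm base y = true
    · rw [if_pos hp, if_pos hp, List.length_cons]
      have hle := pvTakeWhile_len_le (p := pvIsTerm base) ys.reverse
      simp only [List.length_reverse] at hle
      rw [ih]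
      push_cast
      omega
    · rw [if_neg hp, if_neg hp, List.length_nil]
      push_cast
      omega

-- ===== VERDICT (by name: the statement is the Claim_ definition above) =====
theorem find_insertion_index_py_spec : Claim_equal_find_insertion_index_py := by
  intro lines _
  match lines with
  | [] => rfl
  | first :: rest =>
    show ((pvLoopA (first :: rest)
            (PySem.Str.len first - PySem.Str.len (pvLstripSp first)) (first :: rest).length : Nat) : Int)
        = (PySem.List.enumerate (first :: rest) 0).foldl
            (pvStepB (PySem.Str.len first - PySem.Str.len (pvLstripSp first))) (-1) + 1
    set base := PySem.Str.len first - PySem.Str.len (pvLstripSp first) with hbase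
    rw [pvLoopA_char (first :: rest) base (first :: rest).length le_rfl,
        pvFoldB_char base (first :: rest)]
    have hle := pvTakeWhile_len_le (p := pvIsTerm base) (first :: rest).reverse
    simp only [List.length_reverse] at hle
    simp only [List.take_length]
    omega
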